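-- pv_equiv track=rewrite | github.com/jlemansk1/Spreadsheet | table_dict_generator.py | generate_dict
-- ===== SOURCE A (Python) =====
-- from string import ascii_lowercase
-- import itertools
--
-- def str_generator():
--     for size in itertools.count(1):
--         for x in itertools.product(ascii_lowercase, repeat=size):
--             yield "".join(x)
--
-- def generate_dict(number_of_columns):
--     dict = {}
--     i = 0
--     for column_name in itertools.islice(str_generator(), number_of_columns):
--         column_name = column_name[0].upper() + column_name[1:]
--         dict[i] = column_name
--         i += 1
--     return dict
-- ===== SOURCE B (Python) =====
-- import itertools
--
-- def generate_dict(number_of_columns):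
--     def name(i):
--         digits = []
--         while True:
--             digits.append(i % 26)
--             i = i // 26 - 1
--             if i < 0:
--                 break
--         digits.reverse()
--         return chr(65 + digits[0]) + "".join(chr(97 + d) for d in digits[1:])
--     return {i: name(i) for i in itertools.islice(itertools.count(), number_of_columns)}
-- ===== Notes on version B (the rewrite author's own statement) =====
-- stated objective: alternative
-- what changed: Replaces the enumeration of all lowercase strings via nested itertools.product generators with a direct bijective base-26 computation of each column name from its index (capitalizing the first letter), giving O(1) random access per index instead of sequential generation.
import Mathlib
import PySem

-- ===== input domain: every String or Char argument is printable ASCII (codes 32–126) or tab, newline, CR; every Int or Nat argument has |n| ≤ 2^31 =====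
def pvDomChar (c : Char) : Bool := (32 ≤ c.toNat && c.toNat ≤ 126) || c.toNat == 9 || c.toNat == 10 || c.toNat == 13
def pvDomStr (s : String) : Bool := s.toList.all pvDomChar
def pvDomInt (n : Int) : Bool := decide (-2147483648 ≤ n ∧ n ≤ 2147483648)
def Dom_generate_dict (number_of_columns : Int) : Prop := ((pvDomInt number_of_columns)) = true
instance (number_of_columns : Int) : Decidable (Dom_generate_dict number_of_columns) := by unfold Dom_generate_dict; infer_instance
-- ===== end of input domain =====

-- B replaces A's sequential itertools.product enumeration of all lowercase names by a direct
-- bijective base-26 computation of each column name from its index (objective: alternative algorithm).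

-- ===== PORT A =====
-- string.ascii_lowercase
def pvLetters : List Char :=
  ['a','b','c','d','e','f','g','h','i','j','k','l','m','n','o','p','q','r','s','t','u','v','w','x','y','z']

-- itertools.product(ascii_lowercase, repeat=size): leftmost position varies slowest
def pvProduct : Nat → List (List Char)
  | 0 => [[]]
  | s+1 => pvLetters.flatMap (fun c => (pvProduct s).map (fun t => c :: t))

-- islice(str_generator(), n): walk sizes 1,2,… taking names until n are collected.
-- fuel = remaining count; each size yields ≥ 1 name, so fuel `rem` suffices (totality guard only).
def pvTakeAux : Nat → Nat → Nat → List (List Char)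
  | 0, _, _ => []
  | f+1, s, rem =>
    if rem = 0 then [] else
      let xs := pvProduct s
      if rem ≤ xs.length then xs.take rem
      else xs ++ pvTakeAux f (s+1) (rem - xs.length)

def pvTake (s rem : Nat) : List (List Char) := pvTakeAux rem s rem

-- column_name[0].upper() + column_name[1:]
def pvCap : List Char → List Char
  | [] => []
  | c :: r => PySem.Chars.upper [c] ++ r

def generate_dict (number_of_columns : Int) : List (Int × String) :=
  let names := pvTake 1 number_of_columns.toNat
  (names.foldl
    (fun (st : PySem.Dict Int String × Int) cs =>
      (st.1.insert st.2 (String.ofList (pvCap cs)), st.2 + 1))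
    (PySem.Dict.empty, 0)).1.items

-- ===== PORT B =====
-- the while loop collecting i % 26 digits with i = i // 26 - 1 until i < 0
-- (fuel = i; the next index is i / 26 - 1 < i, so fuel i suffices — totality guard only)
def pvBDigitsAux : Nat → Nat → List Nat
  | 0, i => [i % 26]
  | f+1, i => if i / 26 = 0 then [i % 26] else i % 26 :: pvBDigitsAux f (i / 26 - 1)

def pvBDigits (i : Nat) : List Nat := pvBDigitsAux i i

-- chr(65 + digits[0]) + "".join(chr(97 + d) for d in digits[1:])
def pvBName (i : Nat) : String :=
  match (pvBDigits i).reverse with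
  | [] => ""          -- unreachable: the digit list is never empty
  | d :: rest => String.ofList (Char.ofNat (65 + d) :: rest.map (fun e => Char.ofNat (97 + e)))

def generate_dict_alt (number_of_columns : Int) : List (Int × String) :=
  (List.range number_of_columns.toNat).map (fun (i : Nat) => ((i : Int), pvBName i))

-- ===== PRECONDITION & SPEC =====
-- Pre_ excludes negative counts, on which both Pythons raise ValueError (islice stop argument).
def Pre_generate_dict (number_of_columns : Int) : Prop := 0 ≤ number_of_columns
instance (number_of_columns : Int) : Decidable (Pre_generate_dict number_of_columns) := by
  unfold Pre_generate_dict; infer_instance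

def pvWitness_generate_dict : Int := (30)

def Spec_generate_dict (number_of_columns : Int) (out : List (Int × String)) : Prop :=
  out = generate_dict_alt number_of_columns
instance (number_of_columns : Int) (out : List (Int × String)) : Decidable (Spec_generate_dict number_of_columns out) := by
  unfold Spec_generate_dict; infer_instance

-- ===== CLAIM (what is proved, stated in full; the proofs are below) =====
def Claim_equal_generate_dict : Prop := ∀ (number_of_columns : Int), Dom_generate_dict number_of_columns → Pre_generate_dict number_of_columns → Spec_generate_dict number_of_columns (generate_dict number_of_columns)

-- ===== LEMMAS AND PROOFS =====

-- the lowercase character list that B's digit loop denotes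
def pvLetterC (d : Nat) : Char := Char.ofNat (97 + d)
def pvLName (i : Nat) : List Char := (pvBDigits i).reverse.map pvLetterC

-- start index of the size-(s+1) block of names in A's enumeration
def pvBase : Nat → Nat
  | 0 => 0
  | s+1 => pvBase s + 26 ^ (s + 1)

theorem pvBase_mul (s : Nat) : pvBase (s + 1) = 26 * (pvBase s + 1) := by
  induction s with
  | zero => rfl
  | succ s ih =>
    show pvBase (s+1) + 26 ^ (s+2) = 26 * (pvBase (s+1) + 1)
    rw [show pvBase (s+1) + 26 ^ (s+2) = 26 * (pvBase s + 1 + 26 ^ (s+1)) from by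
          rw [ih, pow_succ, pow_succ]; ring,
        show pvBase (s+1) = pvBase s + 26 ^ (s+1) from rfl]
    ring

theorem pvAux_fuel : ∀ i f g, i ≤ f → i ≤ g → pvBDigitsAux f i = pvBDigitsAux g i := by
  intro i
  induction i using Nat.strong_induction_on with
  | _ i ih =>
    intro f g hf hg
    match f, g with
    | 0, 0 => rfl
    | 0, g+1 =>
      have : i = 0 := Nat.le_zero.mp hf
      subst this; simp [pvBDigitsAux]
    | f+1, 0 =>
      have : i = 0 := Nat.le_zero.mp hg
      subst this; simp [pvBDigitsAux]
    | f+1, g+1 =>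
      show pvBDigitsAux (f+1) i = pvBDigitsAux (g+1) i
      simp only [pvBDigitsAux]
      by_cases h : i / 26 = 0
      · simp [h]
      · simp only [h]
        have hlt : i / 26 - 1 < i := by
          have h26 : 26 ≤ i := by
            by_contra hc
            exact h (Nat.div_eq_of_lt (by omega))
          have := Nat.div_le_self i 26
          omega
        rw [ih (i / 26 - 1) hlt f g (by omega) (by omega)]

theorem pvLName_lt (i : Nat) (h : i < 26) : pvLName i = [pvLetterC i] := by
  have hd : pvBDigits i = [i] := by
    unfold pvBDigits
    match i, h with
    | 0, _ => rfl
    | (n+1 : Nat), h =>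
      show pvBDigitsAux (n+1) (n+1) = _
      simp only [pvBDigitsAux]
      rw [if_pos (Nat.div_eq_of_lt h), Nat.mod_eq_of_lt h]
  simp [pvLName, hd]

theorem pvLName_ge (i : Nat) (h : 26 ≤ i) :
    pvLName i = pvLName (i / 26 - 1) ++ [pvLetterC (i % 26)] := by
  have hd : pvBDigits i = i % 26 :: pvBDigits (i / 26 - 1) := by
    unfold pvBDigits
    obtain ⟨n, rfl⟩ : ∃ n, i = n + 1 := ⟨i - 1, by omega⟩
    show pvBDigitsAux (n+1) (n+1) = _
    simp only [pvBDigitsAux]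
    have h0 : (n+1) / 26 ≠ 0 := by
      intro hc; have := Nat.lt_of_div_eq_zero (by omega) hc; omega
    rw [if_neg h0]
    congr 1
    have hle : (n+1) / 26 - 1 ≤ n := by
      have := Nat.div_le_self (n+1) 26; omega
    exact pvAux_fuel ((n+1)/26 - 1) n ((n+1)/26 - 1) hle le_rfl
  simp [pvLName, hd]

theorem pvLName_prepend (s : Nat) :
    ∀ c j, c < 26 → j < 26 ^ (s + 1) →
      pvLName (pvBase (s + 1) + c * 26 ^ (s + 1) + j) = pvLetterC c :: pvLName (pvBase s + j) := by
  induction s with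
  | zero =>
    intro c j hc hj
    have hj' : j < 26 := by simpa using hj
    have hI26 : pvBase (0 + 1) + c * 26 ^ (0 + 1) + j = 26 + c * 26 + j := by
      norm_num [show pvBase 1 = 26 from rfl]
    rw [hI26]
    have hI : 26 ≤ 26 + c * 26 + j := by omega
    rw [pvLName_ge _ hI]
    have h1 : (26 + c * 26 + j) / 26 - 1 = c := by omega
    have h2 : (26 + c * 26 + j) % 26 = j := by omega
    rw [h1, h2, pvLName_lt c hc]
    have : pvBase 0 + j = j := by simp [pvBase]
    rw [this, pvLName_lt j hj']
    rfl
  | succ s ih =>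
    intro c j hc hj
    set P := 26 ^ (s + 1) with hP
    have hpow : 26 ^ (s + 2) = 26 * P := by rw [hP, pow_succ]; ring
    have hBs1 : pvBase (s + 1) = 26 * (pvBase s + 1) := pvBase_mul s
    have hBs2 : pvBase (s + 2) = 26 * (pvBase (s + 1) + 1) := pvBase_mul (s + 1)
    have hPpos : 0 < P := by positivity
    -- the outer index, written as 26 * A + j
    have hI : pvBase (s + 2) + c * 26 ^ (s + 2) + j = 26 * (pvBase (s + 1) + 1 + c * P) + j := by
      rw [hBs2, hpow]; ring
    have hdiv : (pvBase (s + 2) + c * 26 ^ (s + 2) + j) / 26 = pvBase (s + 1) + 1 + c * P + j / 26 := by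
      rw [hI, Nat.mul_add_div (by omega)]
    have hmod : (pvBase (s + 2) + c * 26 ^ (s + 2) + j) % 26 = j % 26 := by
      rw [hI, Nat.mul_add_mod]
    have hge : 26 ≤ pvBase (s + 2) + c * 26 ^ (s + 2) + j := by
      rw [hBs2]; omega
    rw [pvLName_ge _ hge, hdiv, hmod]
    have hj26 : j / 26 < P := by
      rw [Nat.div_lt_iff_lt_mul (by omega)]
      calc j < 26 ^ (s + 2) := hj
        _ = P * 26 := by rw [hpow]; ring
    have harg : pvBase (s + 1) + 1 + c * P + j / 26 - 1 = pvBase (s + 1) + c * P + j / 26 := by omega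
    rw [harg, ih c (j / 26) hc hj26]
    -- unfold the RHS name at pvBase (s+1) + j
    have hge2 : 26 ≤ pvBase (s + 1) + j := by rw [hBs1]; omega
    have hI2 : pvBase (s + 1) + j = 26 * (pvBase s + 1) + j := by rw [hBs1]
    have hdiv2 : (pvBase (s + 1) + j) / 26 - 1 = pvBase s + j / 26 := by
      rw [hI2, Nat.mul_add_div (by omega)]; omega
    have hmod2 : (pvBase (s + 1) + j) % 26 = j % 26 := by rw [hI2, Nat.mul_add_mod]
    rw [pvLName_ge _ hge2, hdiv2, hmod2]
    simp

theorem length_pvProduct (s : Nat) : (pvProduct s).length = 26 ^ s := by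
  induction s with
  | zero => rfl
  | succ s ih =>
    show (pvLetters.flatMap _).length = _
    rw [List.length_flatMap]
    have : pvLetters.map (fun c => ((pvProduct s).map (fun t => c :: t)).length)
         = pvLetters.map (fun _ => 26 ^ s) := by
      apply List.map_congr_left; intro c _; rw [List.length_map, ih]
    rw [this, List.map_const', List.sum_replicate, smul_eq_mul]
    show 26 * 26 ^ s = 26 ^ (s + 1)
    rw [pow_succ]; ring

theorem pvLetters_eq : pvLetters = (List.range 26).map pvLetterC := by decide

theorem range_mul_flatMap (k m : Nat) :
    List.range (k * m) = (List.range k).flatMap (fun c => (List.range m).map (fun r => c * m + r)) := by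
  induction k with
  | zero => simp
  | succ k ih =>
    rw [List.range_succ, Nat.succ_mul, List.range_add, ih, List.flatMap_append]
    simp

theorem pvProduct_eq (s : Nat) :
    pvProduct (s + 1) = (List.range (26 ^ (s + 1))).map (fun j => pvLName (pvBase s + j)) := by
  induction s with
  | zero =>
    have h1 : pvProduct 1 = (List.range 26).map (fun c => [pvLetterC c]) := by decide
    rw [pow_one, h1]
    apply List.map_congr_left
    intro j hj
    rw [List.mem_range] at hj
    rw [show pvBase 0 + j = j from by simp [pvBase], pvLName_lt j hj]
  | succ s ih =>
    show pvLetters.flatMap (fun c => (pvProduct (s+1)).map (fun t => c :: t)) = _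
    have hpow : 26 ^ (s + 2) = 26 * 26 ^ (s + 1) := by rw [pow_succ]; ring
    rw [pvLetters_eq, ih, hpow, range_mul_flatMap 26 (26 ^ (s + 1)), List.flatMap_map, List.map_flatMap]
    apply List.flatMap_congr
    intro c hc
    rw [List.mem_range] at hc
    rw [List.map_map, List.map_map]
    apply List.map_congr_left
    intro j hj
    rw [List.mem_range] at hj
    show pvLetterC c :: pvLName (pvBase s + j) = pvLName (pvBase (s + 1) + (c * 26 ^ (s + 1) + j))
    rw [← Nat.add_assoc, pvLName_prepend s c j hc hj]

theorem pvTakeAux_eq (f : Nat) : ∀ s rem, rem ≤ f →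
    pvTakeAux f (s + 1) rem = (List.range rem).map (fun j => pvLName (pvBase s + j)) := by
  induction f with
  | zero => intro s rem h; have : rem = 0 := Nat.le_zero.mp h; subst this; rfl
  | succ f ih =>
    intro s rem h
    show (if rem = 0 then [] else _) = _
    by_cases h0 : rem = 0
    · subst h0; simp
    · rw [if_neg h0]
      simp only
      by_cases hle : rem ≤ (pvProduct (s + 1)).length
      · rw [if_pos hle, pvProduct_eq, ← List.map_take, List.take_range]
        have : min rem (26 ^ (s + 1)) = rem := by
          rw [length_pvProduct] at hle; omega
        rw [this]
      · rw [if_neg hle]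
        have hpos : 0 < 26 ^ (s + 1) := by positivity
        have hL : (pvProduct (s + 1)).length = 26 ^ (s + 1) := length_pvProduct (s + 1)
        rw [hL] at hle ⊢
        rw [ih (s + 1) (rem - 26 ^ (s + 1)) (by omega), pvProduct_eq]
        have hsplit : rem = 26 ^ (s + 1) + (rem - 26 ^ (s + 1)) := by omega
        conv_rhs => rw [hsplit, List.range_add, List.map_append]
        congr 1
        rw [List.map_map]
        apply List.map_congr_left
        intro j _
        show pvLName (pvBase (s + 1) + j) = pvLName (pvBase s + (26 ^ (s + 1) + j))
        have : pvBase (s + 1) = pvBase s + 26 ^ (s + 1) := rfl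
        rw [this, Nat.add_assoc]

theorem pvAux_mem_lt (f : Nat) : ∀ i d, d ∈ pvBDigitsAux f i → d < 26 := by
  induction f with
  | zero => intro i d h; simp [pvBDigitsAux] at h; omega
  | succ f ih =>
    intro i d h
    simp only [pvBDigitsAux] at h
    by_cases h0 : i / 26 = 0
    · simp [h0] at h; omega
    · rw [if_neg h0] at h
      rcases List.mem_cons.mp h with h | h
      · omega
      · exact ih _ d h

theorem pvUpper_letter : ∀ d, d < 26 → PySem.Chars.upper [Char.ofNat (97 + d)] = [Char.ofNat (65 + d)] := by
  decide

theorem pvAux_ne_nil (f i : Nat) : pvBDigitsAux f i ≠ [] := by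
  cases f with
  | zero => simp [pvBDigitsAux]
  | succ f => simp only [pvBDigitsAux]; split <;> simp

theorem pvCap_name (i : Nat) : String.ofList (pvCap (pvLName i)) = pvBName i := by
  unfold pvBName pvLName
  rcases h : (pvBDigits i).reverse with _ | ⟨d, rest⟩
  · exact absurd (List.reverse_eq_nil_iff.mp h) (pvAux_ne_nil i i)
  · have hd : d < 26 := by
      have : d ∈ pvBDigits i := by
        rw [← List.mem_reverse, h]; simp
      exact pvAux_mem_lt i i d this
    simp only [List.map_cons, pvCap]
    rw [show pvLetterC d = Char.ofNat (97 + d) from rfl, pvUpper_letter d hd]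
    rfl

theorem pvFold_items (f : List Char → String) :
    ∀ (names : List (List Char)) (d : PySem.Dict Int String) (i : Int),
      (∀ k ∈ d.keys, k < i) →
      (names.foldl (fun (st : PySem.Dict Int String × Int) cs => (st.1.insert st.2 (f cs), st.2 + 1)) (d, i)).1.items
        = d.items ++ (PySem.List.enumerate names i).map (fun p => (p.1, f p.2)) := by
  intro names
  induction names with
  | nil => intro d i h; simp [PySem.List.enumerate_nil]
  | cons c cs ih =>
    intro d i h
    have hnc : d.contains i = false := by
      by_contra hc
      have : d.contains i = true := by
        cases hcc : d.contains i with
        | false => exact absurd hcc hc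
        | true => rfl
      exact absurd rfl (Int.ne_of_lt (h i ((PySem.Dict.contains_iff_mem_keys _ _).mp this))).symm
    simp only [List.foldl_cons]
    rw [ih (d.insert i (f c)) (i + 1) ?keys]
    case keys =>
      intro k hk
      rw [PySem.Dict.mem_keys_insert] at hk
      rcases hk with rfl | hk
      · omega
      · have := h k hk; omega
    rw [PySem.Dict.items_insert_of_not_contains _ _ hnc]
    simp [PySem.List.enumerate_cons]

theorem enumerate_map {α β : Type} (g : α → β) (xs : List α) (i : Int) :
    PySem.List.enumerate (xs.map g) i = (PySem.List.enumerate xs i).map (fun p => (p.1, g p.2)) := by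
  induction xs generalizing i with
  | nil => simp [PySem.List.enumerate_nil]
  | cons x xs ih => simp [PySem.List.enumerate_cons, ih]

theorem enumerate_range (m : Nat) : ∀ s : Int,
    PySem.List.enumerate (List.range m) s = (List.range m).map (fun (j : Nat) => (s + (j : Int), j)) := by
  induction m with
  | zero => intro s; simp [PySem.List.enumerate_nil]
  | succ m ih =>
    intro s
    rw [List.range_succ_eq_map, PySem.List.enumerate_cons, List.map_cons, enumerate_map, ih,
        List.map_map, List.map_map]
    congr 1
    · simp
    · apply List.map_congr_left
      intro j _
      simp only [Function.comp_apply, Prod.mk.injEq]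
      refine ⟨by push_cast; ring, trivial⟩

-- ===== VERDICT (by name: the statement is the Claim_ definition above) =====
theorem generate_dict_spec : Claim_equal_generate_dict := by
  intro n _ hpre
  show generate_dict n = generate_dict_alt n
  unfold generate_dict generate_dict_alt pvTake
  rw [pvTakeAux_eq n.toNat 0 n.toNat le_rfl]
  rw [pvFold_items _ _ PySem.Dict.empty 0 (by intro k hk; simp [PySem.Dict.keys_empty] at hk)]
  rw [enumerate_map, enumerate_range]
  simp only [List.map_map]
  apply List.map_congr_left
  intro j _
  simp only [Function.comp]
  show ((0 : Int) + (j : Int), String.ofList (pvCap (pvLName (pvBase 0 + j)))) = ((j : Int), pvBName j)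
  rw [pvCap_name]
  simp [pvBase]
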